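-- pv_equiv track=rewrite | github.com/CybrZone/phishkiller | permutate.py | generate_dot_positions
-- ===== SOURCE A (Python) =====
-- from itertools import permutations, product
-- from typing import List
--
-- def generate_dot_positions(word: str, num_dots: int) -> List[List[int]]:
-- 	"""
-- 	Generates all permutations for inserting dots between letters.
-- 	Generates duplicate dots too - Bug/Feature?
-- 	"""
-- 	word_length = len(word)
-- 	positions = list(permutations(range(1, word_length), num_dots))
-- 	valid_positions = []
-- 	for pos in positions:
-- 		valid = True
-- 		for i in range(len(pos) - 1):
-- 			if pos[i] + 1 == pos[i + 1]:
-- 				valid = False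
-- 				break
-- 		if valid:
-- 			valid_positions.append(list(pos))
-- 	return valid_positions
-- ===== SOURCE B (Python) =====
-- def generate_dot_positions(word, num_dots):
--     """Recursive backtracking: build each valid position list directly, pruning a
--     candidate equal to the previous choice + 1 instead of filtering afterwards."""
--     if num_dots < 0:
--         raise ValueError("num_dots must be non-negative")
--
--     def dfs(prev, remaining, r):
--         if r > len(remaining):
--             return []
--         if r == 0:
--             return [[]]
--         out = []
--         for c in remaining:
--             if prev is not None and prev + 1 == c:
--                 continue
--             rest = remaining[:]
--             rest.remove(c)
--             for tail in dfs(c, rest, r - 1):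
--                 out.append([c] + tail)
--         return out
--
--     return dfs(None, list(range(1, len(word))), num_dots)
-- ===== Notes on version B (the rewrite author's own statement) =====
-- stated objective: alternative
-- what changed: Replaced enumerate-all-permutations-then-filter with a recursive backtracking search that prunes a candidate equal to the previous position + 1 while building, so invalid sequences are never generated.
import Mathlib
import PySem

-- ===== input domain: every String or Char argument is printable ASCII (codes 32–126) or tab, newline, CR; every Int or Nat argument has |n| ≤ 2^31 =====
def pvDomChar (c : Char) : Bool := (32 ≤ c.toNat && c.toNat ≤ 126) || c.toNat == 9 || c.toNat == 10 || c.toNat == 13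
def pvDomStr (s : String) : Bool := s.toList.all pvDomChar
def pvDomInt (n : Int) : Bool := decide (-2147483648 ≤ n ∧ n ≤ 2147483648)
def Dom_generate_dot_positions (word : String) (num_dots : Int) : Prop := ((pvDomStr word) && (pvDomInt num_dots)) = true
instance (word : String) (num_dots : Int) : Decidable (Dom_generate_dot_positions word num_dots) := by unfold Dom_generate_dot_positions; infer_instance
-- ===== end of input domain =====

-- B replaces generate-then-filter by a pruning backtracking search (alternative decomposition, same results).

-- ===== PORT A =====
-- inner loop 'for i in range(len(pos)-1): if pos[i]+1 == pos[i+1]: valid=False; break'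
-- as the equivalent scan over adjacent pairs (stops at the first violation, like the break)
def pvValid (pos : List Int) : Bool :=
  match pos with
  | a :: b :: t => if a + 1 == b then false else pvValid (b :: t)
  | _ => true

def generate_dot_positions (word : String) (num_dots : Int) : List (List Int) :=
  if num_dots < 0 then []  -- Python: itertools.permutations raises ValueError; excluded by Pre_
  else
    let word_length := PySem.Str.len word
    let positions := PySem.List.permutations (PySem.List.pyRange 1 word_length 1) num_dots.toNat
    positions.foldl (fun acc pos => if pvValid pos then acc ++ [pos] else acc) []

-- ===== PORT B =====
def pvPrune (prev : Option Int) (c : Int) : Bool :=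
  match prev with
  | none => false
  | some p => p + 1 == c

-- dfs(prev, remaining, r): 'rest.remove(c)' is List.erase (first occurrence)
def pvDfs (r : Nat) (prev : Option Int) (pool : List Int) : List (List Int) :=
  if pool.length < r then []
  else match r with
  | 0 => [[]]
  | r + 1 =>
      pool.flatMap (fun c =>
        if pvPrune prev c then []
        else (pvDfs r (some c) (pool.erase c)).map (fun tail => c :: tail))

def generate_dot_positions_alt (word : String) (num_dots : Int) : List (List Int) :=
  if num_dots < 0 then []  -- Python B raises ValueError; excluded by Pre_
  else pvDfs num_dots.toNat none (PySem.List.pyRange 1 (PySem.Str.len word) 1)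

-- ===== PRECONDITION & SPEC =====
-- Pre_ excludes num_dots < 0, where both Pythons raise ValueError.
def Pre_generate_dot_positions (word : String) (num_dots : Int) : Prop := 0 ≤ num_dots
instance (word : String) (num_dots : Int) : Decidable (Pre_generate_dot_positions word num_dots) := by unfold Pre_generate_dot_positions; infer_instance
def pvWitness_generate_dot_positions : String × Int := ("abcde", 2)

def Spec_generate_dot_positions (word : String) (num_dots : Int) (out : List (List Int)) : Prop := out = generate_dot_positions_alt word num_dots
instance (word : String) (num_dots : Int) (out : List (List Int)) : Decidable (Spec_generate_dot_positions word num_dots out) := by unfold Spec_generate_dot_positions; infer_instance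

-- ===== CLAIM (what is proved, stated in full; the proofs are below) =====
def Claim_equal_generate_dot_positions : Prop := ∀ (word : String) (num_dots : Int), Dom_generate_dot_positions word num_dots → Pre_generate_dot_positions word num_dots → Spec_generate_dot_positions word num_dots (generate_dot_positions word num_dots)

-- ===== LEMMAS AND PROOFS =====

-- validity of a list continued from an optional previous element
def pvChk (prev : Option Int) (l : List Int) : Bool :=
  match prev with
  | none => pvValid l
  | some p => pvValid (p :: l)

lemma pvChk_nil (prev : Option Int) : pvChk prev [] = true := by
  cases prev <;> simp [pvChk, pvValid]

lemma pvChk_cons (prev : Option Int) (c : Int) (t : List Int) :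
    pvChk prev (c :: t) = if pvPrune prev c then false else pvChk (some c) t := by
  cases prev <;> simp [pvChk, pvPrune, pvValid]

-- flatMap over indices (with eraseIdx) equals flatMap over elements (with erase) on a Nodup list
lemma idx_elem_flatMap (H : Int → List Int → List (List Int)) :
    ∀ (pool : List Int), pool.Nodup →
      (List.range pool.length).flatMap (fun i => H (pool.getD i 0) (pool.eraseIdx i))
        = pool.flatMap (fun c => H c (pool.erase c)) := by
  intro pool
  induction pool generalizing H with
  | nil => intro _; simp
  | cons x xs ih =>
      intro hnd
      have hx : x ∉ xs := (List.nodup_cons.mp hnd).1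
      have hxs : xs.Nodup := (List.nodup_cons.mp hnd).2
      rw [List.length_cons, List.range_succ_eq_map, List.flatMap_cons, List.flatMap_map]
      have h1 : (List.range xs.length).flatMap
            (fun i => H ((x :: xs).getD (i + 1) 0) ((x :: xs).eraseIdx (i + 1)))
          = (List.range xs.length).flatMap
            (fun i => (fun c l => H c (x :: l)) (xs.getD i 0) (xs.eraseIdx i)) := by
        apply List.flatMap_congr
        intro i _
        simp [List.eraseIdx_cons_succ]
      rw [h1, ih (fun c l => H c (x :: l)) hxs]
      have h2 : xs.flatMap (fun c => H c (x :: xs.erase c))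
          = xs.flatMap (fun c => H c ((x :: xs).erase c)) := by
        apply List.flatMap_congr
        intro c hc
        have : x ≠ c := fun h => hx (h ▸ hc)
        rw [List.erase_cons_tail]
        simp [this]
      rw [h2, List.flatMap_cons, List.erase_cons_head]
      simp

-- one unfolding of PySem.List.permutations (definitional)
lemma perms_unfold (pool : List Int) (r : Nat) :
    PySem.List.permutations pool (r + 1)
      = (List.range pool.length).flatMap (fun i =>
          match pool[i]? with
          | none => []
          | some x => (PySem.List.permutations (pool.eraseIdx i) r).map (fun p => x :: p)) := by
  rw [PySem.List.permutations]
  apply List.flatMap_congr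
  intro i _
  cases pool[i]? <;> rfl

-- itertools.permutations on a Nodup pool, one step
lemma perms_succ_nodup (pool : List Int) (r : Nat) (hnd : pool.Nodup) :
    PySem.List.permutations pool (r + 1)
      = pool.flatMap (fun c => (PySem.List.permutations (pool.erase c) r).map (fun p => c :: p)) := by
  rw [perms_unfold, ← idx_elem_flatMap (fun c l => (PySem.List.permutations l r).map (fun p => c :: p)) pool hnd]
  apply List.flatMap_congr
  intro i hi
  have hlt : i < pool.length := List.mem_range.mp hi
  simp [List.getD_eq_getElem?_getD, List.getElem?_eq_getElem hlt]

-- permutations of length r from fewer than r elements: none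
lemma perms_nil_of_lt : ∀ (r : Nat) (pool : List Int), pool.length < r →
    PySem.List.permutations pool r = [] := by
  intro r
  induction r with
  | zero => intro pool h; omega
  | succ r ih =>
      intro pool h
      rw [perms_unfold, List.flatMap_eq_nil_iff]
      intro i hi
      have hlt : i < pool.length := List.mem_range.mp (by simpa using hi)
      simp only [List.getElem?_eq_getElem hlt]
      rw [ih (pool.eraseIdx i) (by simp [List.length_eraseIdx, hlt]; omega)]
      simp

-- main loop correspondence: DFS with pruning = filter of the permutation list
lemma dfs_eq_filter (r : Nat) :
    ∀ (pool : List Int) (prev : Option Int), pool.Nodup →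
      pvDfs r prev pool = (PySem.List.permutations pool r).filter (pvChk prev) := by
  induction r with
  | zero => intro pool prev _; simp [pvDfs, PySem.List.permutations, pvChk_nil]
  | succ r ih =>
      intro pool prev hnd
      by_cases hlen : pool.length < r + 1
      · rw [pvDfs, if_pos hlen, perms_nil_of_lt (r + 1) pool hlen]
        simp
      · rw [perms_succ_nodup pool r hnd, List.filter_flatMap, pvDfs, if_neg hlen]
        apply List.flatMap_congr
        intro c hc
        by_cases hp : pvPrune prev c = true
        · have : ∀ t, pvChk prev (c :: t) = false := by
            intro t; rw [pvChk_cons]; simp [hp]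
          rw [if_pos hp, eq_comm, List.filter_eq_nil_iff]
          intro a ha
          obtain ⟨t, _, rfl⟩ := List.mem_map.mp ha
          simp [this]
        · have hp' : pvPrune prev c = false := by simpa using hp
          rw [if_neg hp, ih (pool.erase c) (some c) (hnd.erase c), List.filter_map]
          congr 1
          apply List.filter_congr
          intro t _
          simp [Function.comp, pvChk_cons, hp']

-- ===== VERDICT (by name: the statement is the Claim_ definition above) =====
theorem generate_dot_positions_spec : Claim_equal_generate_dot_positions := by
  intro word num_dots _ hpre
  unfold Spec_generate_dot_positions generate_dot_positions generate_dot_positions_alt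
  have hneg : ¬ num_dots < 0 := not_lt.mpr hpre
  rw [if_neg hneg, if_neg hneg,
    dfs_eq_filter _ _ none (PySem.List.nodup_pyRange_one 1 (PySem.Str.len word))]
  have hch : pvChk none = pvValid := rfl
  rw [hch]
  simpa using PySem.List.foldl_append_if pvValid id
    (PySem.List.permutations (PySem.List.pyRange 1 (PySem.Str.len word) 1) num_dots.toNat) []
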